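-- pv_equiv track=rewrite | github.com/fatam0rgana/parsing_bytes | parse_bytes.py | get_data_from_payload
-- ===== SOURCE A (Python) =====
-- device_settings = [{0: [3, 'field1'],
--                     3: [1, 'field2'],
--                     4: [1, 'field3'],
--                     5: [3, 'field4']},
--                    {0: [1, 'field5'],
--                     1: [1, 'field6'],
--                     2: [1, 'field7'],
--                     3: [3, 'field8'],
--                     },
--                    {0: [1, 'field9'],
--                     5: [1, 'field10']
--                     },
--                    {}
--                    ]
--
-- field1 = {'0': 'Low',
--           '1': 'reserved',
--           '2': 'reserved',
--           '3': 'reserved',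
--           '4': 'Medium',
--           '5': 'reserved',
--           '6': 'reserved',
--           '7': 'High',
--           }
--
-- field4 = {'0': '00',
--           '1': '10',
--           '2': '20',
--           '3': '30',
--           '4': '40',
--           '5': '50',
--           '6': '60',
--           '7': '70',
--           }
--
-- field8 = {'0': 'Very Low',
--           '1': 'reserved',
--           '2': 'Low',
--           '3': 'reserved',
--           '4': 'Medium',
--           '5': 'High',
--           '6': 'reserved',
--           '7': 'Very High',
--           }
--
-- def parse_bytes(payload):
--     return [f'{int(payload[i:i+2], 16):0>8b}' for i in range(0, len(payload), 2)]
--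
-- def get_data_from_payload(payload):
--     res = {}
--     bytes_ = parse_bytes(payload)
--     for ind, byte in enumerate(bytes_):
--         cnt = 0
--         byte = byte[::-1]
--         while cnt < len(byte):
--             try:
--                 num_of_bits, field = device_settings[ind].get(cnt)
--                 cur = byte[cnt: cnt+num_of_bits]
--                 res[field] = f'{int(cur):0>2}'
--                 cnt += num_of_bits
--             except TypeError as t:
--                 cnt += 1
--                 continue
--     res['field1'] = field1.get(str(int(res.get('field1'), 2)))
--     res['field4'] = field4.get(str(int(res.get('field4'), 2)))
--     res['field8'] = field8.get(str(int(res.get('field8'), 2)))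
--     return res
-- ===== SOURCE B (Python) =====
-- device_settings = [{0: [3, 'field1'],
--                     3: [1, 'field2'],
--                     4: [1, 'field3'],
--                     5: [3, 'field4']},
--                    {0: [1, 'field5'],
--                     1: [1, 'field6'],
--                     2: [1, 'field7'],
--                     3: [3, 'field8'],
--                     },
--                    {0: [1, 'field9'],
--                     5: [1, 'field10']
--                     },
--                    {}
--                    ]
--
-- field1 = {'0': 'Low', '1': 'reserved', '2': 'reserved', '3': 'reserved',
--           '4': 'Medium', '5': 'reserved', '6': 'reserved', '7': 'High'}
--
-- field4 = {'0': '00', '1': '10', '2': '20', '3': '30',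
--           '4': '40', '5': '50', '6': '60', '7': '70'}
--
-- field8 = {'0': 'Very Low', '1': 'reserved', '2': 'Low', '3': 'reserved',
--           '4': 'Medium', '5': 'High', '6': 'reserved', '7': 'Very High'}
--
--
-- def get_data_from_payload(payload):
--     vals = [int(payload[i:i + 2], 16) for i in range(0, len(payload), 2)]
--     res = {}
--     for ind, val in enumerate(vals):
--         for start, (num_of_bits, field) in device_settings[ind].items():
--             n = sum(((val >> (start + k)) & 1) * 10 ** (num_of_bits - 1 - k)
--                     for k in range(num_of_bits))
--             res[field] = f'{n:0>2}'
--     res['field1'] = field1.get(str(int(res.get('field1'), 2)))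
--     res['field4'] = field4.get(str(int(res.get('field4'), 2)))
--     res['field8'] = field8.get(str(int(res.get('field8'), 2)))
--     return res
-- ===== Notes on version B (the rewrite author's own statement) =====
-- stated objective: alternative
-- what changed: B replaces A's reversed-binary-string machinery (format each byte to an eight-digit binary string, reverse it, run a while-loop position scan driven by TypeError, string slicing and reparsing with int()) by direct arithmetic bit extraction: for each labeled field it computes sum(((val >> (start+k)) & 1) * 10**(bits-1-k)) over the settings dict's items, so no bit-string is ever built or scanned.
import Mathlib
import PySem

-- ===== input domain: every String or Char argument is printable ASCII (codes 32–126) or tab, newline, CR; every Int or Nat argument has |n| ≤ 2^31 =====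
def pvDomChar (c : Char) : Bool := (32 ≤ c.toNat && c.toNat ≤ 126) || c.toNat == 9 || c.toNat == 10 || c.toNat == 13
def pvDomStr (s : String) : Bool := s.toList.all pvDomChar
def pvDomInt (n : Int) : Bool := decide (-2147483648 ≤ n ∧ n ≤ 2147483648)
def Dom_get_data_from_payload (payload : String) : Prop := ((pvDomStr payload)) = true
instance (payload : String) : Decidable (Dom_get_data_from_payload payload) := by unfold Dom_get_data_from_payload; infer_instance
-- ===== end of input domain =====

-- B replaces A's reversed-bit-string slicing by arithmetic bit extraction (same cost; 'alternative').

-- ===== shared module constants and helpers (identical source lines in Source A and Source B) =====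

-- int(payload[i:i+2], 16)
def pvChunkVal? (L : List Char) (i : Int) : Option Int :=
  PySem.Int.ofCharsBase? (PySem.List.slice L (some i) (some (i + 2))) 16

-- f'{…:0>w}' : left-pad with '0' to width w
def pvPad0 (w : Nat) (cs : List Char) : List Char :=
  List.replicate (w - cs.length) '0' ++ cs

def pvD0 : PySem.Dict Int (Int × String) :=
  PySem.Dict.ofList [(0, (3, "field1")), (3, (1, "field2")), (4, (1, "field3")), (5, (3, "field4"))]
def pvD1 : PySem.Dict Int (Int × String) :=
  PySem.Dict.ofList [(0, (1, "field5")), (1, (1, "field6")), (2, (1, "field7")), (3, (3, "field8"))]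
def pvD2 : PySem.Dict Int (Int × String) :=
  PySem.Dict.ofList [(0, (1, "field9")), (5, (1, "field10"))]
def pvD3 : PySem.Dict Int (Int × String) := PySem.Dict.ofList []

def pvDeviceSettings : List (PySem.Dict Int (Int × String)) := [pvD0, pvD1, pvD2, pvD3]

def pvField1 : PySem.Dict String String :=
  PySem.Dict.ofList [("0", "Low"), ("1", "reserved"), ("2", "reserved"), ("3", "reserved"),
                     ("4", "Medium"), ("5", "reserved"), ("6", "reserved"), ("7", "High")]

def pvField4 : PySem.Dict String String :=
  PySem.Dict.ofList [("0", "00"), ("1", "10"), ("2", "20"), ("3", "30"),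
                     ("4", "40"), ("5", "50"), ("6", "60"), ("7", "70")]

def pvField8 : PySem.Dict String String :=
  PySem.Dict.ofList [("0", "Very Low"), ("1", "reserved"), ("2", "Low"), ("3", "reserved"),
                     ("4", "Medium"), ("5", "High"), ("6", "reserved"), ("7", "Very High")]

-- the last three statements of both Pythons (they are the same source lines in Source A and Source B):
-- res['fieldN'] = fieldN.get(str(int(res.get('fieldN'), 2))); none = TypeError (missing key) /
-- ValueError, or a None value stored where the result type wants a string — all outside Pre_.
def pvFinalize1 (m : PySem.Dict String String) (key : String) (res : PySem.Dict String String) :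
    Option (PySem.Dict String String) :=
  match res.get? key with
  | none => none
  | some s =>
    match PySem.Int.ofStrBase? s 2 with
    | none => none
    | some v =>
      match m.get? (PySem.Int.toStr v) with
      | none => none
      | some r => some (res.insert key r)

def pvFinalize (res : PySem.Dict String String) : Option (PySem.Dict String String) :=
  match pvFinalize1 pvField1 "field1" res with
  | none => none
  | some res =>
    match pvFinalize1 pvField4 "field4" res with
    | none => none
    | some res => pvFinalize1 pvField8 "field8" res

-- ===== PORT A =====

-- f'{v:0>8b}'
def pvFmt8 (v : Int) : List Char := pvPad0 8 (PySem.Int.toBinChars v)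

-- parse_bytes: [f'{int(payload[i:i+2], 16):0>8b}' for i in range(0, len(payload), 2)]
def pvParseBytesGo (L : List Char) : List Int → Option (List (List Char))
  | [] => some []
  | i :: is =>
    match pvChunkVal? L i with
    | none => none
    | some v => (pvParseBytesGo L is).map (pvFmt8 v :: ·)

def pvParseBytes? (L : List Char) : Option (List (List Char)) :=
  pvParseBytesGo L (PySem.List.pyRange 0 (PySem.List.len L) 2)

-- the inner 'while cnt < len(byte)' loop; fuel = len(byte) bounds the iteration count, since
-- cnt grows by num_of_bits ≥ 1 (or by 1 on the TypeError branch) on every pass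
def pvScanA (d : PySem.Dict Int (Int × String)) (byte : List Char) :
    Nat → Int → PySem.Dict String String → Option (PySem.Dict String String)
  | 0, _, res => some res
  | fuel + 1, cnt, res =>
    if cnt < PySem.List.len byte then
      match d.get? cnt with
      | none => pvScanA d byte fuel (cnt + 1) res        -- .get(cnt) is None: TypeError, cnt += 1
      | some (numOfBits, field) =>
        match PySem.Int.ofChars? (PySem.List.slice byte (some cnt) (some (cnt + numOfBits))) with
        | none => none                                    -- int(cur): ValueError, uncaught
        | some x =>
          pvScanA d byte fuel (cnt + numOfBits)
            (res.insert field (String.ofList (pvPad0 2 (PySem.Int.toChars x))))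
    else some res

-- for ind, byte in enumerate(bytes_)
def pvLoopA : List (List Char) → Nat → PySem.Dict String String → Option (PySem.Dict String String)
  | [], _, res => some res
  | b :: bs, ind, res =>
    match pvDeviceSettings[ind]? with
    | none => none                                        -- IndexError
    | some d =>
      match pvScanA d b.reverse b.reverse.length 0 res with   -- byte = byte[::-1]
      | none => none
      | some res' => pvLoopA bs (ind + 1) res'

def get_data_from_payload (payload : String) : List (String × String) :=
  match pvParseBytes? payload.toList with
  | none => []                                            -- a raise in A: excluded by Pre_
  | some bytes_ =>
    match pvLoopA bytes_ 0 PySem.Dict.empty with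
    | none => []
    | some res =>
      match pvFinalize res with
      | none => []
      | some res => res.items

-- ===== PORT B =====

-- vals = [int(payload[i:i+2], 16) for i in range(0, len(payload), 2)]
def pvValsGo (L : List Char) : List Int → Option (List Int)
  | [] => some []
  | i :: is =>
    match pvChunkVal? L i with
    | none => none
    | some v => (pvValsGo L is).map (v :: ·)

def pvVals? (L : List Char) : Option (List Int) :=
  pvValsGo L (PySem.List.pyRange 0 (PySem.List.len L) 2)

-- sum(((val >> (start + k)) & 1) * 10 ** (num_of_bits - 1 - k) for k in range(num_of_bits))
def pvBNum (v st nb : Int) : Int :=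
  (PySem.List.pyRange 0 nb 1).foldl
    (fun acc k => acc + PySem.Int.band (v >>> (st + k).toNat) 1 * 10 ^ (nb - 1 - k).toNat) 0

-- for start, (num_of_bits, field) in device_settings[ind].items(): res[field] = f'{n:0>2}'
def pvPerByteB (d : PySem.Dict Int (Int × String)) (v : Int) (res : PySem.Dict String String) :
    PySem.Dict String String :=
  d.items.foldl
    (fun r p => r.insert p.2.2 (String.ofList (pvPad0 2 (PySem.Int.toChars (pvBNum v p.1 p.2.1))))) res

def pvLoopB : List Int → Nat → PySem.Dict String String → Option (PySem.Dict String String)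
  | [], _, res => some res
  | v :: vs, ind, res =>
    match pvDeviceSettings[ind]? with
    | none => none                                        -- IndexError
    | some d => pvLoopB vs (ind + 1) (pvPerByteB d v res)

def get_data_from_payload_alt (payload : String) : List (String × String) :=
  match pvVals? payload.toList with
  | none => []
  | some vals =>
    match pvLoopB vals 0 PySem.Dict.empty with
    | none => []
    | some res =>
      match pvFinalize res with
      | none => []
      | some res => res.items

-- ===== PRECONDITION & SPEC =====

-- chunk k must parse in base 16 and, unless it is the 4th chunk (whose settings dict is
-- empty, so its value is never sliced), parse to an ordinary byte value 0..255
def pvPreChunk (L : List Char) (k : Nat) : Bool :=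
  match pvChunkVal? L (2 * k) with
  | none => false
  | some v => k == 3 || (decide (0 ≤ v) && decide (v < 256))

-- Pre_ excludes the inputs on which A raises (fewer than 2 or more than 4 byte-chunks, or a
-- chunk int() cannot parse in base 16), and additionally the payloads whose 1st-3rd chunk
-- parses NEGATIVE (a minus sign inside the chunk): that is not hex-byte data at all, A's
-- fields there are slices of a reversed minus-bearing rendering and B's are arithmetic bit
-- reads — neither value is specified, so such garbage payloads stay outside the claim.
-- (The bound v < 256 excludes nothing: a 1-2 character chunk cannot parse to 256 or more.)
def Pre_get_data_from_payload (payload : String) : Prop :=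
  3 ≤ payload.toList.length ∧ payload.toList.length ≤ 8 ∧
  ∀ k : Nat, k < 4 → 2 * k < payload.toList.length → pvPreChunk payload.toList k = true

instance (payload : String) : Decidable (Pre_get_data_from_payload payload) := by
  unfold Pre_get_data_from_payload; infer_instance

def pvWitness_get_data_from_payload : String := "0f23"

def Spec_get_data_from_payload (payload : String) (out : List (String × String)) : Prop :=
  out = get_data_from_payload_alt payload

instance (payload : String) (out : List (String × String)) :
    Decidable (Spec_get_data_from_payload payload out) := by
  unfold Spec_get_data_from_payload; infer_instance

-- ===== CLAIM (what is proved, stated in full; the proofs are below) =====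

def Claim_equal_get_data_from_payload : Prop :=
  ∀ (payload : String), Dom_get_data_from_payload payload →
    Pre_get_data_from_payload payload →
    Spec_get_data_from_payload payload (get_data_from_payload payload)

-- ===== LEMMAS AND PROOFS =====

-- A's comprehension is B's comprehension with f'{…:0>8b}' mapped over it
theorem pvGo_bridge (L : List Char) (is : List Int) :
    pvParseBytesGo L is = (pvValsGo L is).map (List.map pvFmt8) := by
  induction is with
  | nil => rfl
  | cons i is ih =>
    simp only [pvParseBytesGo, pvValsGo]
    cases pvChunkVal? L i with
    | none => rfl
    | some v => cases h : pvValsGo L is <;> simp [ih, h]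

theorem pvParseBytes_eq (L : List Char) :
    pvParseBytes? L = (pvVals? L).map (List.map pvFmt8) := pvGo_bridge L _

-- the pair list A's inner loop inserts, res-free
def pvScanPairs (d : PySem.Dict Int (Int × String)) (byte : List Char) :
    Nat → Int → Option (List (String × String))
  | 0, _ => some []
  | fuel + 1, cnt =>
    if cnt < PySem.List.len byte then
      match d.get? cnt with
      | none => pvScanPairs d byte fuel (cnt + 1)
      | some (numOfBits, field) =>
        match PySem.Int.ofChars? (PySem.List.slice byte (some cnt) (some (cnt + numOfBits))) with
        | none => none
        | some x =>
          (pvScanPairs d byte fuel (cnt + numOfBits)).map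
            ((field, String.ofList (pvPad0 2 (PySem.Int.toChars x))) :: ·)
    else some []

theorem pvScanA_eq (d : PySem.Dict Int (Int × String)) (byte : List Char) :
    ∀ (fuel : Nat) (cnt : Int) (res : PySem.Dict String String),
      pvScanA d byte fuel cnt res =
        (pvScanPairs d byte fuel cnt).map (fun ps => ps.foldl (fun r p => r.insert p.1 p.2) res) := by
  intro fuel
  induction fuel with
  | zero => intro cnt res; rfl
  | succ fuel ih =>
    intro cnt res
    simp only [pvScanA, pvScanPairs]
    split
    · cases d.get? cnt with
      | none => exact ih _ _
      | some p =>
        obtain ⟨nb, f⟩ := p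
        dsimp only
        cases hx : PySem.Int.ofChars? (PySem.List.slice byte (some cnt) (some (cnt + nb))) with
        | none => simp
        | some x =>
          dsimp only
          rw [ih]
          cases h : pvScanPairs d byte fuel (cnt + nb) <;> simp [List.foldl]
    · rfl

def pvBPairs (d : PySem.Dict Int (Int × String)) (v : Int) : List (String × String) :=
  d.items.map (fun p => (p.2.2, String.ofList (pvPad0 2 (PySem.Int.toChars (pvBNum v p.1 p.2.1)))))

theorem pvPerByteB_eq (d : PySem.Dict Int (Int × String)) (v : Int)
    (res : PySem.Dict String String) :
    pvPerByteB d v res = (pvBPairs d v).foldl (fun r p => r.insert p.1 p.2) res := by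
  simp [pvPerByteB, pvBPairs, List.foldl_map]

-- per-byte agreement, all 0 ≤ v < 256, for the three populated settings dicts (checked by kernel)
set_option maxRecDepth 100000 in
set_option maxHeartbeats 4000000 in
theorem pvPairs_dec : ∀ ind : Nat, ind < 3 → ∀ n : Nat, n < 256 →
    pvScanPairs (pvDeviceSettings.getD ind PySem.Dict.empty) (pvFmt8 (n : Int)).reverse
        (pvFmt8 (n : Int)).reverse.length 0
      = some (pvBPairs (pvDeviceSettings.getD ind PySem.Dict.empty) (n : Int)) := by
  decide

-- the empty settings dict: A's scan inserts nothing, for ANY byte string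
theorem pvScanPairs_empty (byte : List Char) :
    ∀ (fuel : Nat) (cnt : Int),
      pvScanPairs (PySem.Dict.ofList ([] : List (Int × (Int × String)))) byte fuel cnt = some [] := by
  intro fuel
  induction fuel with
  | zero => intro cnt; rfl
  | succ fuel ih =>
    intro cnt
    simp only [pvScanPairs]
    split
    · exact ih _
    · rfl

def pvOK (ind : Nat) (v : Int) : Prop := ind = 3 ∨ (0 ≤ v ∧ v < 256)

theorem pvPerByte_eq (ind : Nat) (d : PySem.Dict Int (Int × String))
    (hd : pvDeviceSettings[ind]? = some d) (v : Int) (hOK : pvOK ind v)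
    (res : PySem.Dict String String) :
    pvScanA d (pvFmt8 v).reverse (pvFmt8 v).reverse.length 0 res = some (pvPerByteB d v res) := by
  have hlen : ind < 4 := by
    have h := List.getElem?_eq_some_iff.mp hd
    simpa [pvDeviceSettings] using h.1
  by_cases h3 : ind = 3
  · subst h3
    have hdd : d = PySem.Dict.ofList [] := by
      simp only [pvDeviceSettings] at hd
      simp only [List.getElem?_cons_succ, List.getElem?_cons_zero] at hd
      exact (Option.some_inj.mp hd).symm
    subst hdd
    rw [pvScanA_eq, pvScanPairs_empty]
    rfl
  · obtain ⟨hge, hlt⟩ : 0 ≤ v ∧ v < 256 := hOK.resolve_left h3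
    obtain ⟨n, rfl⟩ : ∃ n : Nat, v = (n : Int) := ⟨v.toNat, (Int.toNat_of_nonneg hge).symm⟩
    have hn : n < 256 := by exact_mod_cast hlt
    have hd' : pvDeviceSettings.getD ind PySem.Dict.empty = d := by
      simp [List.getD_eq_getElem?_getD, hd]
    rw [pvScanA_eq, ← hd', pvPairs_dec ind (by omega) n hn, pvPerByteB_eq]
    rfl

theorem pvLoop_eq : ∀ (vs : List Int) (ind : Nat) (res : PySem.Dict String String),
    (∀ k (h : k < vs.length), pvOK (ind + k) vs[k]) →
    pvLoopA (vs.map pvFmt8) ind res = pvLoopB vs ind res := by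
  intro vs
  induction vs with
  | nil => intro ind res _; rfl
  | cons v vs ih =>
    intro ind res hOK
    simp only [List.map, pvLoopA, pvLoopB]
    cases hd : pvDeviceSettings[ind]? with
    | none => rfl
    | some d =>
      dsimp only
      rw [pvPerByte_eq ind d hd v (by simpa using hOK 0 (by simp))]
      exact ih (ind + 1) _ (fun k h => by
        have := hOK (k + 1) (by simpa using Nat.succ_lt_succ h)
        simpa [Nat.add_comm, Nat.add_assoc, Nat.add_left_comm] using this)

theorem pvValsGo_get (L : List Char) : ∀ (is : List Int) (vs : List Int),
    pvValsGo L is = some vs →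
    vs.length = is.length ∧ ∀ k (h : k < is.length), pvChunkVal? L is[k] = vs[k]? := by
  intro is
  induction is with
  | nil => intro vs h; cases h; exact ⟨rfl, fun k h => absurd h (by simp)⟩
  | cons i is ih =>
    intro vs h
    simp only [pvValsGo] at h
    cases hc : pvChunkVal? L i with
    | none => rw [hc] at h; cases h
    | some v =>
      rw [hc] at h
      cases h2 : pvValsGo L is with
      | none => rw [h2] at h; cases h
      | some ws =>
        rw [h2] at h
        cases h
        obtain ⟨hl, hk⟩ := ih ws h2
        refine ⟨by simp [hl], fun k hkl => ?_⟩
        cases k with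
        | zero => simpa using hc
        | succ k => simpa using hk k (by simpa using hkl)

theorem pvCore (payload : String) (is : List Int)
    (hr : PySem.List.pyRange 0 (PySem.List.len payload.toList) 2 = is)
    (his : ∀ k (h : k < is.length), is[k] = 2 * k) (hlen4 : is.length ≤ 4)
    (hlen2 : 2 * is.length ≤ payload.toList.length + 1)
    (hpre : Pre_get_data_from_payload payload) :
    get_data_from_payload payload = get_data_from_payload_alt payload := by
  obtain ⟨h3, h8, hch⟩ := hpre
  unfold get_data_from_payload get_data_from_payload_alt
  rw [pvParseBytes_eq]
  cases hv : pvVals? payload.toList with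
  | none => rfl
  | some vs =>
    have hv' : pvValsGo payload.toList is = some vs := by
      rw [← hr]; exact hv
    obtain ⟨hlv, hk⟩ := pvValsGo_get payload.toList is vs hv'
    have hOKs : ∀ k (h : k < vs.length), pvOK (0 + k) vs[k] := by
      intro k hkv
      have hki : k < is.length := by omega
      have hc : pvChunkVal? payload.toList (2 * (k : Int)) = some vs[k] := by
        have h := hk k hki
        rw [his k hki] at h
        rw [List.getElem?_eq_getElem hkv] at h
        exact h
      by_cases hk3 : k = 3
      · exact Or.inl (by simp [hk3])
      · right
        have hpc := hch k (by omega) (by omega)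
        unfold pvPreChunk at hpc
        rw [hc] at hpc
        simp only [Bool.or_eq_true, Bool.and_eq_true, beq_iff_eq, decide_eq_true_eq] at hpc
        exact hpc.resolve_left hk3
    dsimp only [Option.map]
    rw [pvLoop_eq vs 0 PySem.Dict.empty hOKs]

-- ===== VERDICT (by name: the statement is the Claim_ definition above) =====

theorem get_data_from_payload_spec : Claim_equal_get_data_from_payload := by
  intro payload _ hpre
  unfold Spec_get_data_from_payload
  have h3 := hpre.1
  have h8 := hpre.2.1
  have h36 : payload.toList.length = 3 ∨ payload.toList.length = 4 ∨ payload.toList.length = 5 ∨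
      payload.toList.length = 6 ∨ payload.toList.length = 7 ∨ payload.toList.length = 8 := by omega
  have hlen : PySem.List.len payload.toList = (payload.toList.length : Int) := PySem.List.len_eq _
  rcases h36 with h | h | h | h | h | h
  · exact pvCore payload [0, 2] (by rw [hlen, h]; decide) (by decide) (by decide)
      (by simp only [List.length_cons, List.length_nil]; omega) hpre
  · exact pvCore payload [0, 2] (by rw [hlen, h]; decide) (by decide) (by decide)
      (by simp only [List.length_cons, List.length_nil]; omega) hpre
  · exact pvCore payload [0, 2, 4] (by rw [hlen, h]; decide) (by decide) (by decide)
      (by simp only [List.length_cons, List.length_nil]; omega) hpre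
  · exact pvCore payload [0, 2, 4] (by rw [hlen, h]; decide) (by decide) (by decide)
      (by simp only [List.length_cons, List.length_nil]; omega) hpre
  · exact pvCore payload [0, 2, 4, 6] (by rw [hlen, h]; decide) (by decide) (by decide)
      (by simp only [List.length_cons, List.length_nil]; omega) hpre
  · exact pvCore payload [0, 2, 4, 6] (by rw [hlen, h]; decide) (by decide) (by decide)
      (by simp only [List.length_cons, List.length_nil]; omega) hpre
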